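-- pv_equiv track=rewrite | github.com/ishasranawat/DSA | strings.py | minChangesToMakeAnagram
-- ===== SOURCE A (Python) =====
-- from collections import Counter
-- from collections import Counter  # This helps us count characters in a string
--
-- str = "abcdcba"
--
-- def minChangesToMakeAnagram(s: str) -> int:
--     n = len(s)  # Get the length of the string
--
--     # Split the string into two halves
--     first_half = s[:n//2]  # First half
--     second_half = s[n//2:]  # Second half
--
--     # Count how many times each character appears in both halves
--     count_first = Counter(first_half)   # Count for first half
--     count_second = Counter(second_half) # Count for second half
--
--     changes_needed = 0  # Start with zero changes needed
--
--     # Compare the counts of characters in both halves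
--     for char in count_first:  # For each character in the first half
--         if count_first[char] > count_second[char]:  # If there are more characters in the first half than needed
--             changes_needed += count_first[char] - count_second[char]  # Add the difference to the changes needed
--
--     return changes_needed  # Return the total changes needed to make the halves anagrams
-- ===== SOURCE B (Python) =====
-- def minChangesToMakeAnagram(s: str) -> int:
--     n = len(s)
--     first = sorted(s[:n // 2])
--     second = sorted(s[n // 2:])
--     i = j = changes = 0
--     while i < len(first):
--         if j >= len(second) or first[i] < second[j]:
--             # no matching character left in the second half
--             changes += 1
--             i += 1
--         elif first[i] > second[j]:
--             j += 1
--         else: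
--             i += 1
--             j += 1
--     return changes
-- ===== Notes on version B (the rewrite author's own statement) =====
-- stated objective: alternative
-- what changed: Replaces the two Counter hash maps and the per-key comparison loop with sorting both halves and a single two-pointer merge that counts first-half characters with no remaining match in the second half.
import Mathlib
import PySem

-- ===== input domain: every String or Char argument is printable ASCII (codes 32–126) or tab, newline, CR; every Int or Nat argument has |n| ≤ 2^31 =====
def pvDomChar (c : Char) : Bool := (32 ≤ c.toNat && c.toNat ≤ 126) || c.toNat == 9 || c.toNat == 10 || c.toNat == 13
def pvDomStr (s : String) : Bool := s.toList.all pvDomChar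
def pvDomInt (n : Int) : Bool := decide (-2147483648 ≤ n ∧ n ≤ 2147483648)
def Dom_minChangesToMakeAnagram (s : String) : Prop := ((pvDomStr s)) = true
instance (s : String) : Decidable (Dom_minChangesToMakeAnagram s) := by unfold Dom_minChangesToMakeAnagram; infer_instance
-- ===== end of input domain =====

-- B replaces A's two Counters and per-key comparison loop by sorting both halves and
-- counting unmatched first-half characters in a single two-pointer merge (alternative algorithm, same exact result).

-- ===== PORT A =====
def minChangesToMakeAnagram (s : String) : Int :=
  let cs := s.toList
  let n : Int := (cs.length : Int)
  let first_half := PySem.List.slice cs none (some (PySem.Int.floordiv n 2))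
  let second_half := PySem.List.slice cs (some (PySem.Int.floordiv n 2)) none
  let count_first := PySem.Dict.counter first_half
  let count_second := PySem.Dict.counter second_half
  count_first.keys.foldl
    (fun changes_needed ch =>
      if count_first.getD ch 0 > count_second.getD ch 0 then
        changes_needed + (count_first.getD ch 0 - count_second.getD ch 0)
      else changes_needed) 0

-- ===== PORT B =====
-- the while-loop of Source B: two pointers over the sorted halves, rendered as recursion on the suffixes
def pvMergeCount : List Char → List Char → Int
  | [], _ => 0
  | _ :: is, [] => 1 + pvMergeCount is []
  | a :: is, b :: js =>
    if a < b then 1 + pvMergeCount is (b :: js)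
    else if b < a then pvMergeCount (a :: is) js
    else pvMergeCount is js
termination_by l1 l2 => (l1.length, l2.length)

def minChangesToMakeAnagram_alt (s : String) : Int :=
  let cs := s.toList
  let n : Int := (cs.length : Int)
  let first := PySem.List.sorted (PySem.List.slice cs none (some (PySem.Int.floordiv n 2))) (fun x => x) false
  let second := PySem.List.sorted (PySem.List.slice cs (some (PySem.Int.floordiv n 2)) none) (fun x => x) false
  pvMergeCount first second

-- ===== PRECONDITION & SPEC =====
def Spec_minChangesToMakeAnagram (s : String) (out : Int) : Prop := out = minChangesToMakeAnagram_alt s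
instance (s : String) (out : Int) : Decidable (Spec_minChangesToMakeAnagram s out) := by unfold Spec_minChangesToMakeAnagram; infer_instance

-- ===== CLAIM (what is proved, stated in full; the proofs are below) =====
def Claim_equal_minChangesToMakeAnagram : Prop := ∀ (s : String), Dom_minChangesToMakeAnagram s → Spec_minChangesToMakeAnagram s (minChangesToMakeAnagram s)

-- ===== LEMMAS AND PROOFS =====

-- A's conditional-accumulation loop is a sum
theorem pv_foldl_if_sum (l : List Char) (p : Char → Prop) [DecidablePred p]
    (g : Char → Int) (init : Int) :
    l.foldl (fun acc c => if p c then acc + g c else acc) init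
      = init + (l.map (fun c => if p c then g c else 0)).sum := by
  induction l generalizing init with
  | nil => simp
  | cons a t ih =>
    by_cases h : p a
    · simp [h, ih]; ring
    · simp [h, ih]

theorem pv_toFinset_ofList (l : List Char) : (PySem.Set.ofList l).toFinset = l.toFinset := by
  ext x; simp [PySem.Set.mem_ofList]

-- A's per-character positive excess, summed, is the cardinality of the multiset difference
theorem pv_sum_excess (l1 l2 : List Char) :
    ((PySem.Set.ofList l1).map
        (fun c => if (l1.count c : Int) > (l2.count c : Int)
                  then (l1.count c : Int) - (l2.count c : Int) else 0)).sum
      = ((Multiset.card ((l1 : Multiset Char) - (l2 : Multiset Char)) : Nat) : Int) := by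
  rw [← List.sum_toFinset _ (PySem.Set.nodup_ofList l1), pv_toFinset_ofList]
  have hsub : ((l1 : Multiset Char) - (l2 : Multiset Char)).toFinset ⊆ l1.toFinset := by
    intro x hx
    simp only [Multiset.mem_toFinset, List.mem_toFinset] at hx ⊢
    have := Multiset.count_pos.mpr hx
    rw [Multiset.count_sub] at this
    simp only [Multiset.coe_count] at this
    exact List.count_pos_iff.mp (by omega)
  have hcard : Multiset.card ((l1 : Multiset Char) - (l2 : Multiset Char))
      = ∑ x ∈ l1.toFinset, (l1.count x - l2.count x) := by
    rw [← Multiset.toFinset_sum_count_eq ((l1 : Multiset Char) - (l2 : Multiset Char)),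
        Finset.sum_subset hsub (by
          intro x _ hx
          simp only [Multiset.mem_toFinset] at hx
          exact Multiset.count_eq_zero_of_notMem hx)]
    exact Finset.sum_congr rfl (fun x _ => by
      rw [Multiset.count_sub]; simp [Multiset.coe_count])
  rw [hcard]; push_cast
  apply Finset.sum_congr rfl
  intro x _
  by_cases h : (l1.count x : Int) > (l2.count x : Int) <;> simp [h] <;> omega

theorem pv_count_zero_of_lt_head (a b : Char) (js : List Char)
    (hs : (b :: js).Pairwise (fun x y => x ≤ y)) (hab : a < b) :
    (b :: js).count a = 0 := by
  apply List.count_eq_zero.mpr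
  intro hmem
  rcases List.mem_cons.mp hmem with h | h
  · exact absurd h (ne_of_lt hab)
  · exact absurd ((List.pairwise_cons.mp hs).1 a h) (not_le.mpr hab)

theorem pv_cons_sub_right (a : Char) (s t : Multiset Char) (h : t.count a = 0) :
    (a ::ₘ s) - t = a ::ₘ (s - t) := by
  ext x; simp only [Multiset.count_sub, Multiset.count_cons]
  by_cases hx : x = a <;> simp [hx, h]

theorem pv_sub_cons_left (b : Char) (s t : Multiset Char) (h : s.count b = 0) :
    s - (b ::ₘ t) = s - t := by
  ext x; simp only [Multiset.count_sub, Multiset.count_cons]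
  by_cases hx : x = b <;> simp [hx, h]

theorem pv_cons_sub_cons (a : Char) (s t : Multiset Char) :
    a ::ₘ s - a ::ₘ t = s - t := by
  ext x; simp [Multiset.count_sub]

-- the two-pointer merge over sorted halves counts the multiset difference
theorem pv_mergeCount_card (l1 l2 : List Char)
    (h1 : l1.Pairwise (fun x y => x ≤ y)) (h2 : l2.Pairwise (fun x y => x ≤ y)) :
    pvMergeCount l1 l2 = ((Multiset.card ((l1 : Multiset Char) - (l2 : Multiset Char)) : Nat) : Int) := by
  fun_induction pvMergeCount l1 l2 with
  | case1 t => simp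
  | case2 a is ih =>
    rw [ih (List.pairwise_cons.mp h1).2 List.Pairwise.nil]
    simp; omega
  | case3 a is b js hab ih =>
    have hcnt : ((b :: js : List Char) : Multiset Char).count a = 0 := by
      rw [Multiset.coe_count]; exact pv_count_zero_of_lt_head a b js h2 hab
    have hm : ((a :: is : List Char) : Multiset Char) - ((b :: js : List Char) : Multiset Char)
        = a ::ₘ (((is : List Char) : Multiset Char) - ((b :: js : List Char) : Multiset Char)) :=
      pv_cons_sub_right a (↑is) (↑(b :: js)) hcnt
    rw [ih (List.pairwise_cons.mp h1).2 h2, hm, Multiset.card_cons]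
    push_cast; ring
  | case4 a is b js hab hba ih =>
    have hcnt : ((a :: is : List Char) : Multiset Char).count b = 0 := by
      rw [Multiset.coe_count]; exact pv_count_zero_of_lt_head b a is h1 hba
    have hm : ((a :: is : List Char) : Multiset Char) - ((b :: js : List Char) : Multiset Char)
        = ((a :: is : List Char) : Multiset Char) - ((js : List Char) : Multiset Char) :=
      pv_sub_cons_left b (↑(a :: is)) (↑js) hcnt
    rw [ih h1 (List.pairwise_cons.mp h2).2, hm]
  | case5 a is b js hab hba ih =>
    have heq : a = b := le_antisymm (not_lt.mp hba) (not_lt.mp hab)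
    subst heq
    have hm : ((a :: is : List Char) : Multiset Char) - ((a :: js : List Char) : Multiset Char)
        = (((is : List Char) : Multiset Char)) - ((js : List Char) : Multiset Char) :=
      pv_cons_sub_cons a (↑is) (↑js)
    rw [ih (List.pairwise_cons.mp h1).2 (List.pairwise_cons.mp h2).2, hm]

-- ===== VERDICT (by name: the statement is the Claim_ definition above) =====
theorem minChangesToMakeAnagram_spec : Claim_equal_minChangesToMakeAnagram := by
  intro s _
  unfold Spec_minChangesToMakeAnagram minChangesToMakeAnagram minChangesToMakeAnagram_alt
  simp only [PySem.Dict.keys_counter, PySem.Dict.getD_counter]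
  set l1 := PySem.List.slice s.toList none (some (PySem.Int.floordiv (s.toList.length : Int) 2)) with hl1
  set l2 := PySem.List.slice s.toList (some (PySem.Int.floordiv (s.toList.length : Int) 2)) none with hl2
  have hA := pv_foldl_if_sum (PySem.Set.ofList l1)
    (fun c => (l1.count c : Int) > (l2.count c : Int))
    (fun c => (l1.count c : Int) - (l2.count c : Int)) 0
  rw [hA, zero_add, pv_sum_excess,
      pv_mergeCount_card _ _ (PySem.List.sorted_pairwise l1 (fun x => x))
        (PySem.List.sorted_pairwise l2 (fun x => x)),
      Multiset.coe_eq_coe.mpr (PySem.List.sorted_perm l1 (fun x => x) false),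
      Multiset.coe_eq_coe.mpr (PySem.List.sorted_perm l2 (fun x => x) false)]
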